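-- pv_equiv track=rewrite | github.com/jano31415/codejam | codeforces/731_round_div3/probb.py | solve
-- ===== SOURCE A (Python) =====
-- def solve(s):
--     alph = "abcdefghijklmnopqrstuvwxyz"
--     if len(s) > 26:
--         return False
--     if len(s) == 0:
--         return True
--     if "a" not in s:
--         return False
--
--     right=s.index("a")
--     left=right
--     for i,a in enumerate(alph):
--         if a== "a":
--             continue
--         if a not in s:
--             if len(s) == i:
--                 return True
--             else:
--                 return False
--         if left > 0:
--             if a == s[left-1]:
--                 left-=1
--                 continue
--         if right < len(s)-1:
--             if a == s[right+1]:
--                 right+=1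
--                 continue
--         return False
--     return True
-- ===== SOURCE B (Python) =====
-- def solve(s):
--     n = len(s)
--     if n > 26:
--         return False
--     if n == 0:
--         return True
--     vals = [ord(c) - 97 for c in s]
--     if sorted(vals) != list(range(n)):
--         return False
--     p = vals.index(0)
--     return all(vals[i] > vals[i + 1] for i in range(p)) and \
--            all(vals[i] < vals[i + 1] for i in range(p, n - 1))
-- ===== Notes on version B (the rewrite author's own statement) =====
-- stated objective: simpler
-- what changed: A simulates the growth of the block anchored at the first letter a with two moving indices and per-letter membership scans over the alphabet; B instead checks the declarative characterization directly: the letter values sorted must equal range(n) and the sequence must strictly decrease to the position of the letter a and strictly increase after it.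
import Mathlib
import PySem

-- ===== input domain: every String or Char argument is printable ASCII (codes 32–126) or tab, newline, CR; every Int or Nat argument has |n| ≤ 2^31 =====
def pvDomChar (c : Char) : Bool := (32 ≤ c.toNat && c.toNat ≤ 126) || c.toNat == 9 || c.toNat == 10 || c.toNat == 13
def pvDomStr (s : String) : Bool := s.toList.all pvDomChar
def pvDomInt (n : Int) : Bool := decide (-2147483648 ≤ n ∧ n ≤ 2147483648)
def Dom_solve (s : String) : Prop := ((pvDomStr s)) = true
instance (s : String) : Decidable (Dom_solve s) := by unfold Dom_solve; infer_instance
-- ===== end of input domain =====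

-- B replaces A's incremental left/right block simulation by a declarative check:
-- the letter values must be a permutation of 0..n-1 (sorted == range) arranged as a
-- valley around the position of the minimal letter (objective: simpler/alternative, not faster).

-- ===== PORT A =====
-- the for-loop over enumerate(alph); `a not in s` on a 1-char needle is char membership,
-- s[left-1] / s[right+1] are in range whenever the guards hold, so getD's default is never read
def solveLoopA (t : List Char) : List (Int × Char) → Nat → Nat → Bool
  | [], _, _ => true
  | (i, a) :: rest, left, right =>
    if a = 'a' then solveLoopA t rest left right
    else if ¬ (a ∈ t) then decide ((t.length : Int) = i)
    else if left > 0 ∧ t.getD (left - 1) ' ' = a then solveLoopA t rest (left - 1) right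
    else if right < t.length - 1 ∧ t.getD (right + 1) ' ' = a then solveLoopA t rest left (right + 1)
    else false

def solve (s : String) : Bool :=
  let t := s.toList
  let alph := "abcdefghijklmnopqrstuvwxyz".toList
  if t.length > 26 then false
  else if t.length = 0 then true
  else if ¬ ('a' ∈ t) then false
  else
    match PySem.List.index? t 'a' with   -- s.index("a"): 1-char needle, present by the check above
    | some r => solveLoopA t (PySem.List.enumerate alph 0) r r
    | none => false                       -- unreachable: 'a' ∈ t

-- ===== PORT B =====
def solve_alt (s : String) : Bool :=
  let t := s.toList
  let n := t.length
  if n > 26 then false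
  else if n = 0 then true
  else
    let vs : List Int := t.map (fun c => (c.toNat : Int) - 97)   -- [ord(c) - 97 for c in s]
    if PySem.List.sorted vs (fun x => x) false ≠ PySem.List.pyRange 0 (n : Int) 1 then false
    else
      -- vals.index(0): 0 is in vs because sorted(vs) = range(n) and n ≥ 1, so the default is never read
      let p : Nat := (PySem.List.index? vs 0).getD 0
      ((PySem.List.pyRange 0 (p : Int) 1).all
          (fun i => decide (PySem.List.pyGetD vs (i + 1) 0 < PySem.List.pyGetD vs i 0))) &&
      ((PySem.List.pyRange (p : Int) ((n : Int) - 1) 1).all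
          (fun i => decide (PySem.List.pyGetD vs i 0 < PySem.List.pyGetD vs (i + 1) 0)))

-- ===== PRECONDITION & SPEC =====
def Spec_solve (s : String) (out : Bool) : Prop := out = solve_alt s
instance (s : String) (out : Bool) : Decidable (Spec_solve s out) := by unfold Spec_solve; infer_instance

-- ===== CLAIM (what is proved, stated in full; the proofs are below) =====
def Claim_equal_solve : Prop := ∀ (s : String), Dom_solve s → Spec_solve s (solve s)

-- ===== LEMMAS AND PROOFS =====

-- letter value of a char, as in B
def pvVal (c : Char) : Int := (c.toNat : Int) - 97
-- value at position q (default 0, only used with q < length)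
def pvG (t : List Char) (q : Nat) : Int := (t.map pvVal).getD q 0
-- the i-th lowercase letter
def pvLetter (j : Nat) : Char := Char.ofNat (97 + j)
-- tail of enumerate(alph) from index j
def pvAlphTail (j : Nat) : List (Int × Char) :=
  (List.range' j (26 - j)).map (fun (k : Nat) => ((k : Int), pvLetter k))

-- the common characterization: values are a permutation of 0..n-1, valley-shaped around p
def pvValidAt (t : List Char) (p : Nat) : Prop :=
  (t.map pvVal).Perm (PySem.List.pyRange 0 (t.length : Int) 1) ∧
  (∀ q : Nat, q < p → pvG t (q + 1) < pvG t q) ∧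
  (∀ q : Nat, p ≤ q → q + 1 < t.length → pvG t q < pvG t (q + 1))

theorem pvVal_inj {c d : Char} (h : pvVal c = pvVal d) : c = d := by
  have hn : c.toNat = d.toNat := by unfold pvVal at h; omega
  exact Char.ext (UInt32.toNat_inj.mp hn)

theorem pvVal_letter {j : Nat} (h : j < 26) : pvVal (pvLetter j) = (j : Int) := by
  interval_cases j <;> decide

theorem pvAlphTail_zero : PySem.List.enumerate "abcdefghijklmnopqrstuvwxyz".toList 0 = pvAlphTail 0 := by
  decide

theorem pvAlphTail_cons {j : Nat} (h : j < 26) :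
    pvAlphTail j = ((j : Int), pvLetter j) :: pvAlphTail (j + 1) := by
  unfold pvAlphTail
  have h1 : 26 - j = (26 - (j + 1)) + 1 := by omega
  rw [h1, List.range'_succ, List.map_cons]

theorem pvG_eq (t : List Char) (q : Nat) (h : q < t.length) : pvG t q = pvVal t[q] := by
  unfold pvG
  rw [List.getD_eq_getElem _ _ (by simpa using h), List.getElem_map]

theorem pvLetter_ne_a {j : Nat} (h1 : 1 ≤ j) (h2 : j < 26) : pvLetter j ≠ 'a' := by
  intro he
  have hv := pvVal_letter h2
  rw [he] at hv
  have : pvVal 'a' = 0 := by decide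
  omega

theorem pvLetter_mem_iff (t : List Char) {j : Nat} (hj : j < 26) :
    pvLetter j ∈ t ↔ ∃ q, ∃ _ : q < t.length, pvG t q = (j : Int) := by
  rw [List.mem_iff_getElem]
  constructor
  · rintro ⟨q, hq, he⟩
    exact ⟨q, hq, by rw [pvG_eq t q hq, he, pvVal_letter hj]⟩
  · rintro ⟨q, hq, he⟩
    refine ⟨q, hq, ?_⟩
    apply pvVal_inj
    rw [← pvG_eq t q hq, he, pvVal_letter hj]

theorem pvGet_eq_letter {t : List Char} {q j : Nat} (hq : q < t.length) (hj : j < 26)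
    (he : pvG t q = (j : Int)) : t[q] = pvLetter j := by
  apply pvVal_inj
  rw [← pvG_eq t q hq, he, pvVal_letter hj]

theorem pvPerm_bounds {t : List Char} (hperm : (t.map pvVal).Perm (PySem.List.pyRange 0 (t.length : Int) 1))
    {q : Nat} (hq : q < t.length) : 0 ≤ pvG t q ∧ pvG t q < (t.length : Int) := by
  have hm : pvG t q ∈ t.map pvVal := by
    rw [List.mem_iff_getElem]
    exact ⟨q, by simpa using hq, by rw [List.getElem_map, ← pvG_eq t q hq]⟩
  have := hperm.mem_iff.mp hm
  rw [PySem.List.mem_pyRange_one] at this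
  exact this

theorem pvPerm_unique {t : List Char} (hperm : (t.map pvVal).Perm (PySem.List.pyRange 0 (t.length : Int) 1))
    {q1 q2 : Nat} (h1 : q1 < t.length) (h2 : q2 < t.length) (he : pvG t q1 = pvG t q2) : q1 = q2 := by
  have hn0 : (t.map pvVal).Nodup := hperm.nodup_iff.mpr (PySem.List.nodup_pyRange_one 0 _)
  have he' : (t.map pvVal)[q1]'(by simpa using h1) = (t.map pvVal)[q2]'(by simpa using h2) := by
    rw [List.getElem_map, List.getElem_map, ← pvG_eq t q1 h1, ← pvG_eq t q2 h2]; exact he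
  exact (List.Nodup.getElem_inj_iff hn0).mp he'

theorem pvPerm_exists {t : List Char} (hperm : (t.map pvVal).Perm (PySem.List.pyRange 0 (t.length : Int) 1))
    {i : Int} (h0 : 0 ≤ i) (hi : i < (t.length : Int)) : ∃ q, ∃ _ : q < t.length, pvG t q = i := by
  have hm : i ∈ t.map pvVal := hperm.mem_iff.mpr (by rw [PySem.List.mem_pyRange_one]; exact ⟨h0, hi⟩)
  obtain ⟨q, hq, he⟩ := List.mem_iff_getElem.mp hm
  refine ⟨q, by simpa using hq, ?_⟩
  rw [pvG_eq t q (by simpa using hq)]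
  simpa using he

theorem pvFinish (t : List Char) (p : Nat) (hp : p < t.length)
    (hin : ∀ q, q < t.length → 0 ≤ pvG t q ∧ pvG t q < (t.length : Int))
    (hinj : ∀ q1 q2, q1 < t.length → q2 < t.length → pvG t q1 = pvG t q2 → q1 = q2)
    (hdown : ∀ q : Nat, q < p → pvG t (q + 1) < pvG t q)
    (hup : ∀ q : Nat, p ≤ q → q + 1 < t.length → pvG t q < pvG t (q + 1)) : pvValidAt t p := by
  refine ⟨?_, hdown, hup⟩
  have hn0 : (t.map pvVal).Nodup := by
    rw [List.nodup_iff_injective_getElem]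
    intro a b hab
    apply Fin.ext
    apply hinj _ _ (by simpa using a.isLt) (by simpa using b.isLt)
    rw [pvG_eq t _ (by simpa using a.isLt), pvG_eq t _ (by simpa using b.isLt)]
    simpa [List.getElem_map] using hab
  have hsub : (t.map pvVal) ⊆ PySem.List.pyRange 0 (t.length : Int) 1 := by
    intro x hx
    obtain ⟨q, hq, he⟩ := List.mem_iff_getElem.mp hx
    have hq' : q < t.length := by simpa using hq
    have : x = pvG t q := by rw [pvG_eq t q hq']; simpa using he.symm
    rw [PySem.List.mem_pyRange_one, this]
    exact ⟨(hin q hq').1, by simpa using (hin q hq').2⟩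
  have hlen : (PySem.List.pyRange 0 (t.length : Int) 1).length ≤ (t.map pvVal).length := by
    rw [PySem.List.length_pyRange_one, List.length_map]
    omega
  exact (hn0.subperm hsub).perm_of_length_le hlen

-- A-side soundness: a successful run of the loop yields the valley characterization
theorem pvAloop_sound (t : List Char) (p : Nat) :
    ∀ (m i left right : Nat), i = 26 - m → 1 ≤ i → t.length ≤ 26 →
    left ≤ p → p ≤ right → right < t.length →
    right + 1 - left = i →
    (∀ q, left ≤ q → q ≤ right → 0 ≤ pvG t q ∧ pvG t q < (i : Int)) →
    (∀ q1 q2, left ≤ q1 → q1 ≤ right → left ≤ q2 → q2 ≤ right → pvG t q1 = pvG t q2 → q1 = q2) →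
    (∀ q, left ≤ q → q < p → pvG t (q + 1) < pvG t q) →
    (∀ q, p ≤ q → q < right → pvG t q < pvG t (q + 1)) →
    solveLoopA t (pvAlphTail i) left right = true →
    pvValidAt t p := by
  intro m
  induction m with
  | zero =>
    intro i left right hi h1 h26 hlp hpr hrn hsz hin hinj hdown hup _
    have hieq : i = 26 := by omega
    have hl0 : left = 0 ∧ right = t.length - 1 ∧ i = t.length := by omega
    obtain ⟨hl0, hr0, hilen⟩ := hl0
    refine pvFinish t p (by omega) ?_ ?_ ?_ ?_
    · intro q hq
      have := hin q (by omega) (by omega)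
      omega
    · intro q1 q2 hq1 hq2
      exact hinj q1 q2 (by omega) (by omega) (by omega) (by omega)
    · intro q hq
      exact hdown q (by omega) hq
    · intro q hq1 hq2
      exact hup q hq1 (by omega)
  | succ m ih =>
    intro i left right hi h1 h26 hlp hpr hrn hsz hin hinj hdown hup hrun
    have hi26 : i < 26 := by omega
    have hlr : left ≤ right := by omega
    rw [pvAlphTail_cons hi26] at hrun
    simp only [solveLoopA] at hrun
    rw [if_neg (pvLetter_ne_a h1 hi26)] at hrun
    by_cases hmem : pvLetter i ∈ t
    · rw [if_neg (not_not_intro hmem)] at hrun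
      by_cases hL : left > 0 ∧ t.getD (left - 1) ' ' = pvLetter i
      · rw [if_pos hL] at hrun
        obtain ⟨hl0, hget⟩ := hL
        have hgl : pvG t (left - 1) = (i : Int) := by
          rw [pvG_eq t _ (by omega), ← List.getD_eq_getElem t ' ' (by omega), hget, pvVal_letter hi26]
        refine ih (i + 1) (left - 1) right (by omega) (by omega) h26 (by omega) hpr hrn (by omega)
          ?_ ?_ ?_ hup hrun
        · intro q hq1 hq2
          by_cases hqe : q = left - 1
          · rw [hqe, hgl]; push_cast; omega
          · have := hin q (by omega) hq2
            push_cast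
            omega
        · intro q1 q2 hq1 hq1' hq2 hq2' he
          by_cases he1 : q1 = left - 1 <;> by_cases he2 : q2 = left - 1
          · omega
          · rw [he1, hgl] at he
            have := hin q2 (by omega) hq2'
            omega
          · rw [he2, hgl] at he
            have := hin q1 (by omega) hq1'
            omega
          · exact hinj q1 q2 (by omega) hq1' (by omega) hq2' he
        · intro q hq1 hq2
          by_cases hqe : q = left - 1
          · rw [hqe, Nat.sub_add_cancel (by omega), hgl]
            exact (hin left (by omega) hlr).2
          · exact hdown q (by omega) hq2
      · rw [if_neg hL] at hrun
        by_cases hR : right < t.length - 1 ∧ t.getD (right + 1) ' ' = pvLetter i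
        · rw [if_pos hR] at hrun
          obtain ⟨hr1, hget⟩ := hR
          have hgr : pvG t (right + 1) = (i : Int) := by
            rw [pvG_eq t _ (by omega), ← List.getD_eq_getElem t ' ' (by omega), hget, pvVal_letter hi26]
          refine ih (i + 1) left (right + 1) (by omega) (by omega) h26 hlp (by omega) (by omega)
            (by omega) ?_ ?_ hdown ?_ hrun
          · intro q hq1 hq2
            by_cases hqe : q = right + 1
            · rw [hqe, hgr]; push_cast; omega
            · have := hin q hq1 (by omega)
              push_cast
              omega
          · intro q1 q2 hq1 hq1' hq2 hq2' he
            by_cases he1 : q1 = right + 1 <;> by_cases he2 : q2 = right + 1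
            · omega
            · rw [he1, hgr] at he
              have := hin q2 hq2 (by omega)
              omega
            · rw [he2, hgr] at he
              have := hin q1 hq1 (by omega)
              omega
            · exact hinj q1 q2 hq1 (by omega) hq2 (by omega) he
          · intro q hq1 hq2
            by_cases hqe : q = right
            · rw [hqe, hgr]
              exact (hin right (by omega) (by omega)).2
            · exact hup q hq1 (by omega)
        · rw [if_neg hR] at hrun
          exact absurd hrun (by simp)
    · rw [if_pos hmem] at hrun
      have hilen : i = t.length := by
        have := of_decide_eq_true hrun
        omega
      have hl0 : left = 0 ∧ right = t.length - 1 := by omega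
      obtain ⟨hl0, hr0⟩ := hl0
      refine pvFinish t p (by omega) ?_ ?_ ?_ ?_
      · intro q hq
        have := hin q (by omega) (by omega)
        omega
      · intro q1 q2 hq1 hq2
        exact hinj q1 q2 (by omega) (by omega) (by omega) (by omega)
      · intro q hq
        exact hdown q (by omega) hq
      · intro q hq1 hq2
        exact hup q hq1 (by omega)

-- A-side completeness: the valley characterization drives the loop to success
theorem pvAloop_complete (t : List Char) (p : Nat) (hv : pvValidAt t p) :
    ∀ (m i left right : Nat), i = 26 - m → 1 ≤ i → i ≤ t.length → t.length ≤ 26 →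
    left ≤ p → p ≤ right → right < t.length →
    (∀ q, q < t.length → (pvG t q < (i : Int) ↔ left ≤ q ∧ q ≤ right)) →
    solveLoopA t (pvAlphTail i) left right = true := by
  intro m
  induction m with
  | zero =>
    intro i left right hi h1 hile h26 hlp hpr hrn hiv
    have hieq : i = 26 := by omega
    subst hieq
    have he : pvAlphTail 26 = [] := by unfold pvAlphTail; norm_num
    rw [he]
    rfl
  | succ m ih =>
    intro i left right hi h1 hile h26 hlp hpr hrn hiv
    have hi26 : i < 26 := by omega
    rw [pvAlphTail_cons hi26]
    have hperm := hv.1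
    simp only [solveLoopA]
    rw [if_neg (pvLetter_ne_a h1 hi26)]
    by_cases hin : i < t.length
    · obtain ⟨qi, hqi, hgi⟩ := pvPerm_exists hperm (i := (i : Int)) (by positivity) (by exact_mod_cast hin)
      have hmem : pvLetter i ∈ t := (pvLetter_mem_iff t hi26).mpr ⟨qi, hqi, hgi⟩
      rw [if_neg (not_not_intro hmem)]
      have hnotin : ¬ (left ≤ qi ∧ qi ≤ right) := by
        intro hq
        have := (hiv qi hqi).mpr hq
        rw [hgi] at this
        omega
      rcases Nat.lt_or_ge qi left with hql | hqg
      · -- the new letter sits directly left of the block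
        have hq1n : qi + 1 < t.length := by omega
        have hd : pvG t (qi + 1) < pvG t qi := hv.2.1 qi (by omega)
        have hlq1 : left ≤ qi + 1 := by
          have hx : pvG t (qi + 1) < (i : Int) := by rw [hgi] at hd; exact hd
          exact ((hiv (qi + 1) hq1n).mp hx).1
        have hqeq : qi = left - 1 := by omega
        have hl0 : left > 0 := by omega
        have hget : t.getD (left - 1) ' ' = pvLetter i := by
          have h' : t.getD qi ' ' = pvLetter i := by
            rw [List.getD_eq_getElem _ _ hqi]
            exact pvGet_eq_letter hqi hi26 hgi
          rwa [hqeq] at h'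
        rw [if_pos ⟨hl0, hget⟩]
        apply ih (i + 1) (left - 1) right (by omega) (by omega) hin h26 (by omega) hpr hrn
        intro q hq
        constructor
        · intro hlt
          by_cases hqe : pvG t q = (i : Int)
          · have : q = qi := pvPerm_unique hperm hq hqi (hqe.trans hgi.symm)
            omega
          · have h' : pvG t q < (i : Int) := by push_cast at hlt; omega
            have := (hiv q hq).mp h'
            omega
        · rintro ⟨ha, hb⟩
          by_cases hqe : q = left - 1
          · have hqq : q = qi := by omega
            rw [hqq, hgi]; push_cast; omega
          · have := (hiv q hq).mpr ⟨by omega, hb⟩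
            push_cast at this ⊢; omega
      · -- the new letter sits directly right of the block
        have hqr : right < qi := by omega
        have hu : pvG t (qi - 1) < pvG t qi := by
          have := hv.2.2 (qi - 1) (by omega) (by omega)
          rwa [Nat.sub_add_cancel (by omega)] at this
        have hle : qi - 1 ≤ right := by
          have hx : pvG t (qi - 1) < (i : Int) := by rw [hgi] at hu; exact hu
          exact ((hiv (qi - 1) (by omega)).mp hx).2
        have hqeq : qi = right + 1 := by omega
        have hnl : ¬ (left > 0 ∧ t.getD (left - 1) ' ' = pvLetter i) := by
          rintro ⟨hl0, hget⟩
          have hgl : pvG t (left - 1) = (i : Int) := by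
            rw [pvG_eq t _ (by omega), ← List.getD_eq_getElem t ' ' (by omega), hget, pvVal_letter hi26]
          have := pvPerm_unique hperm (by omega) hqi (hgl.trans hgi.symm)
          omega
        rw [if_neg hnl]
        have hrn1 : right < t.length - 1 := by omega
        have hget : t.getD (right + 1) ' ' = pvLetter i := by
          have h' : t.getD qi ' ' = pvLetter i := by
            rw [List.getD_eq_getElem _ _ hqi]
            exact pvGet_eq_letter hqi hi26 hgi
          rwa [hqeq] at h'
        rw [if_pos ⟨hrn1, hget⟩]
        apply ih (i + 1) left (right + 1) (by omega) (by omega) hin h26 hlp (by omega) (by omega)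
        intro q hq
        constructor
        · intro hlt
          by_cases hqe : pvG t q = (i : Int)
          · have : q = qi := pvPerm_unique hperm hq hqi (hqe.trans hgi.symm)
            omega
          · have h' : pvG t q < (i : Int) := by push_cast at hlt; omega
            have := (hiv q hq).mp h'
            omega
        · rintro ⟨ha, hb⟩
          by_cases hqe : q = right + 1
          · have hqq : q = qi := by omega
            rw [hqq, hgi]; push_cast; omega
          · have := (hiv q hq).mpr ⟨ha, by omega⟩
            push_cast at this ⊢; omega
    · -- i = len(s): the letter is missing and the loop reports len(s) == i
      have hieq : i = t.length := by omega
      have hnm : ¬ (pvLetter i ∈ t) := by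
        intro hmem
        obtain ⟨q, hq, hgq⟩ := (pvLetter_mem_iff t hi26).mp hmem
        have hb := (pvPerm_bounds hperm hq).2
        rw [hgq] at hb
        omega
      rw [if_pos hnm]
      simp [hieq]

-- B equals the characterization (n ≥ 1, p the first index of 'a')
theorem pvIdx (t : List Char) : PySem.List.index? (t.map pvVal) 0 = PySem.List.index? t 'a' := by
  induction t with
  | nil => rfl
  | cons c tl ih =>
    by_cases hc : c = 'a'
    · subst hc
      rw [List.map_cons, show pvVal 'a' = 0 from by decide,
        PySem.List.index?_cons_self, PySem.List.index?_cons_self]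
    · have h0 : pvVal c ≠ 0 := fun h => hc (pvVal_inj (h.trans (show (0 : Int) = pvVal 'a' from by decide)))
      rw [List.map_cons, PySem.List.index?_cons_of_ne _ h0, PySem.List.index?_cons_of_ne _ hc, ih]

theorem pvB_iff (t : List Char) (p : Nat) (hn : 1 ≤ t.length) (hn26 : t.length ≤ 26)
    (hp : PySem.List.index? t 'a' = some p) :
    solve_alt (String.ofList t) = true ↔ pvValidAt t p := by
  obtain ⟨hplen, hpa, -⟩ := PySem.List.getElem_of_index?_eq_some hp
  unfold solve_alt
  simp only [String.toList_ofList]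
  rw [if_neg (by omega), if_neg (by omega)]
  have hvs : t.map (fun c => (c.toNat : Int) - 97) = t.map pvVal := rfl
  rw [hvs]
  by_cases hperm : (t.map pvVal).Perm (PySem.List.pyRange 0 (t.length : Int) 1)
  · have hsorted : PySem.List.sorted (t.map pvVal) (fun x => x) false
        = PySem.List.pyRange 0 (t.length : Int) 1 :=
      PySem.List.sorted_eq_of_perm_of_pairwise_lt _ _ _ hperm.symm (PySem.List.pairwise_lt_pyRange_one 0 _)
    rw [if_neg (not_not_intro hsorted)]
    rw [pvIdx, hp, Option.getD_some]
    show (_ && _) = true ↔ _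
    rw [Bool.and_eq_true, List.all_eq_true, List.all_eq_true]
    constructor
    · rintro ⟨h1, h2⟩
      refine ⟨hperm, ?_, ?_⟩
      · intro q hq
        have := of_decide_eq_true (h1 (q : Int)
          (by rw [PySem.List.mem_pyRange_one]; exact ⟨by positivity, by exact_mod_cast hq⟩))
        rw [show ((q : Int) + 1) = ((q + 1 : Nat) : Int) from by push_cast; ring] at this
        rw [PySem.List.pyGetD_natCast, PySem.List.pyGetD_natCast] at this
        exact this
      · intro q hq1 hq2
        have := of_decide_eq_true (h2 (q : Int)
          (by rw [PySem.List.mem_pyRange_one]; exact ⟨by exact_mod_cast hq1, by omega⟩))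
        rw [show ((q : Int) + 1) = ((q + 1 : Nat) : Int) from by push_cast; ring] at this
        rw [PySem.List.pyGetD_natCast, PySem.List.pyGetD_natCast] at this
        exact this
    · rintro ⟨-, h1, h2⟩
      constructor
      · intro i hi
        rw [PySem.List.mem_pyRange_one] at hi
        obtain ⟨hi0, hip⟩ := hi
        have hqi : i = ((i.toNat : Nat) : Int) := by omega
        rw [hqi, show ((i.toNat : Int) + 1) = ((i.toNat + 1 : Nat) : Int) from by push_cast; ring,
          PySem.List.pyGetD_natCast, PySem.List.pyGetD_natCast]
        exact decide_eq_true (h1 i.toNat (by omega))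
      · intro i hi
        rw [PySem.List.mem_pyRange_one] at hi
        obtain ⟨hi0, hip⟩ := hi
        have hqi : i = ((i.toNat : Nat) : Int) := by omega
        rw [hqi, show ((i.toNat : Int) + 1) = ((i.toNat + 1 : Nat) : Int) from by push_cast; ring,
          PySem.List.pyGetD_natCast, PySem.List.pyGetD_natCast]
        exact decide_eq_true (h2 i.toNat (by omega) (by omega))
  · have hsorted : PySem.List.sorted (t.map pvVal) (fun x => x) false
        ≠ PySem.List.pyRange 0 (t.length : Int) 1 := by
      intro he
      exact hperm ((PySem.List.sorted_perm (t.map pvVal) (fun x => x) false).symm.trans (he ▸ List.Perm.refl _))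
    rw [if_pos hsorted]
    exact ⟨fun h => absurd h (by simp), fun hv => absurd hv.1 hperm⟩

theorem pvA_iff (t : List Char) (p : Nat) (hn : 1 ≤ t.length) (hn26 : t.length ≤ 26)
    (hp : PySem.List.index? t 'a' = some p) :
    solve (String.ofList t) = true ↔ pvValidAt t p := by
  obtain ⟨hplen, hpa, -⟩ := PySem.List.getElem_of_index?_eq_some hp
  have hgp : pvG t p = 0 := by rw [pvG_eq t p hplen, hpa]; decide
  have hmem : 'a' ∈ t := (PySem.List.index?_isSome_iff _ _).mp (by rw [hp]; rfl)
  unfold solve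
  simp only [String.toList_ofList]
  rw [if_neg (by omega), if_neg (by omega), if_neg (not_not_intro hmem), hp]
  rw [pvAlphTail_zero, pvAlphTail_cons (by norm_num)]
  simp only [solveLoopA]
  rw [if_pos (show pvLetter 0 = 'a' from by decide)]
  constructor
  · intro hrun
    refine pvAloop_sound t p 25 1 p p (by omega) (by omega) hn26 le_rfl le_rfl hplen (by omega)
      ?_ (by omega) (by omega) (by omega) hrun
    intro q hq1 hq2
    have hqp : q = p := by omega
    rw [hqp, hgp]
    norm_num
  · intro hv
    refine pvAloop_complete t p hv 25 1 p p (by omega) (by omega) (by omega) hn26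
      le_rfl le_rfl hplen ?_
    intro q hq
    have hperm := hv.1
    have hb := pvPerm_bounds hperm hq
    constructor
    · intro hlt
      have hq0 : pvG t q = 0 := by omega
      have : q = p := pvPerm_unique hperm hq hplen (hq0.trans hgp.symm)
      omega
    · rintro ⟨h1, h2⟩
      have : q = p := by omega
      rw [this, hgp]
      norm_num

-- ===== VERDICT (by name: the statement is the Claim_ definition above) =====
theorem pvA_eq_B (s : String) : solve s = solve_alt s := by
  have hs : String.ofList s.toList = s := String.ofList_toList
  by_cases h26 : s.toList.length > 26
  · unfold solve solve_alt
    rw [if_pos h26, if_pos h26]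
  · by_cases h0 : s.toList.length = 0
    · unfold solve solve_alt
      rw [if_neg h26, if_neg h26, if_pos h0, if_pos h0]
    · by_cases hmem : 'a' ∈ s.toList
      · obtain ⟨p, hp⟩ := Option.isSome_iff_exists.mp ((PySem.List.index?_isSome_iff _ _).mpr hmem)
        have hA := pvA_iff s.toList p (by omega) (by omega) hp
        have hB := pvB_iff s.toList p (by omega) (by omega) hp
        rw [hs] at hA hB
        rw [Bool.eq_iff_iff, hA, hB]
      · have hno : (0 : Int) ∉ s.toList.map pvVal := by
          intro hx
          obtain ⟨c, hc, he⟩ := List.mem_map.mp hx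
          have : c = 'a' := pvVal_inj (he.trans (show (0 : Int) = pvVal 'a' from by decide))
          exact hmem (this ▸ hc)
        have hA : solve s = false := by
          conv_lhs => rw [← hs]
          unfold solve
          simp only [String.toList_ofList]
          rw [if_neg h26, if_neg h0, if_pos (by simpa using hmem)]
        have hB : solve_alt s = false := by
          conv_lhs => rw [← hs]
          unfold solve_alt
          simp only [String.toList_ofList]
          rw [if_neg h26, if_neg h0]
          have hvs : s.toList.map (fun c => (c.toNat : Int) - 97) = s.toList.map pvVal := rfl
          rw [hvs]
          rw [if_pos ?_]
          intro he
          have hperm : (s.toList.map pvVal).Perm (PySem.List.pyRange 0 (s.toList.length : Int) 1) := by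
            rw [← he]
            exact (PySem.List.sorted_perm (s.toList.map pvVal) (fun x => x) false).symm
          exact hno (hperm.mem_iff.mpr
            (by rw [PySem.List.mem_pyRange_one]; constructor <;> omega))
        rw [hA, hB]

-- ===== VERDICT (by name: the statement is the Claim_ definition above) =====
theorem solve_spec : Claim_equal_solve := by
  intro s _
  unfold Spec_solve
  exact pvA_eq_B s
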